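-- pv_equiv track=rewrite | github.com/dwfischer9/Scp-Model | src/build_features.py | bag_of_words
-- ===== SOURCE A (Python) =====
-- from collections import Counter
--
-- def bag_of_words(texts):
--     """
--     Computes a bag of words representation for a list of texts
--     """
--     # Preprocess the texts
--     preprocessed_texts = texts
--
--     # Create a dictionary of word frequencies
--     word_freqs = Counter()
--     for text in preprocessed_texts:
--         words = text.split()
--         word_freqs.update(words)
--
--     # Create a list of unique words
--     unique_words = list(word_freqs.keys())
--
--     # Create a dictionary mapping words to indices
--     word_to_index = {word: i for i, word in enumerate(unique_words)}
--
--     # Create a matrix of word frequencies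
--     num_texts = len(preprocessed_texts)
--     num_words = len(unique_words)
--     word_freq_matrix = [[0 for j in range(num_words)] for i in range(num_texts)]
--     for i, text in enumerate(preprocessed_texts):
--         words = text.split()
--         for word in words:
--             word_index = word_to_index[word]
--             word_freq_matrix[i][word_index] += 1
--
--     return word_freq_matrix, unique_words
-- ===== SOURCE B (Python) =====
-- from collections import Counter
--
-- def bag_of_words(texts):
--     # One Counter per text; vocabulary collected in first-appearance order;
--     # each row is built by looking the vocabulary up in that text's counter.
--     counters = [Counter(text.split()) for text in texts]
--     seen = set()
--     vocab = []
--     for text in texts: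
--         for w in text.split():
--             if w not in seen:
--                 seen.add(w)
--                 vocab.append(w)
--     matrix = [[c[w] for w in vocab] for c in counters]
--     return matrix, vocab
-- ===== Notes on version B (the rewrite author's own statement) =====
-- stated objective: idiomatic
-- what changed: B replaces A's global word-to-index dict and in-place matrix-cell incrementing with one Counter per text plus a seen-set vocabulary pass, building each row directly as [counter[w] for w in vocab].
import Mathlib
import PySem

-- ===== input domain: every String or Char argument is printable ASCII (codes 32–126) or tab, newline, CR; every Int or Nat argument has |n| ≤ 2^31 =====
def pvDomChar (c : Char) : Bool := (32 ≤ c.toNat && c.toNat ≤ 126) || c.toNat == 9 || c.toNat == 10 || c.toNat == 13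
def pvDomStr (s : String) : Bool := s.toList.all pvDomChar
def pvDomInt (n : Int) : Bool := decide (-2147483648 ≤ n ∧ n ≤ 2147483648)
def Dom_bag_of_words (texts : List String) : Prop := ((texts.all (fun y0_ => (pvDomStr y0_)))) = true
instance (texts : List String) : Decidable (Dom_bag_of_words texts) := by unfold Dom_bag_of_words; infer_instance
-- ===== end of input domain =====

-- B replaces A's global word→index dict and in-place matrix-cell incrementing with one Counter
-- per text plus a seen-set vocabulary pass, building each row by looking the vocabulary up in
-- that text's counter (objective: idiomatic; same asymptotic cost).

-- ===== PORT A =====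
-- word_freqs = Counter(); for text: word_freqs.update(text.split())
def pvAFreqs (texts : List String) : PySem.Dict String Int :=
  texts.foldl (fun d text =>
    (PySem.Str.split₀ text).foldl (fun d w => d.modify w 0 (· + 1)) d) PySem.Dict.empty

-- word_to_index = {word: i for i, word in enumerate(unique_words)}
def pvAW2I (uniqueWords : List String) : PySem.Dict String Int :=
  (PySem.List.enumerate uniqueWords).foldl (fun d p => d.insert p.2 p.1) PySem.Dict.empty

-- word_index = word_to_index[word]; word_freq_matrix[i][word_index] += 1
-- (none branch = Python's KeyError; it never fires, every split word is a key of word_to_index)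
def pvAStepWord (w2i : PySem.Dict String Int) (i : Nat) (m : List (List Int)) (w : String) :
    List (List Int) :=
  match w2i.get? w with
  | some j => m.modify i (fun row => row.modify j.toNat (· + 1))
  | none => m

-- for i, text in enumerate(preprocessed_texts): for word in text.split(): …
def pvAMatrix (texts : List String) (w2i : PySem.Dict String Int) (mat0 : List (List Int)) :
    List (List Int) :=
  (PySem.List.enumerate texts).foldl (fun m p =>
    (PySem.Str.split₀ p.2).foldl (fun m w => pvAStepWord w2i p.1.toNat m w) m) mat0

def bag_of_words (texts : List String) : List (List Int) × List String :=
  let wordFreqs := pvAFreqs texts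
  let uniqueWords := wordFreqs.keys
  let wordToIndex := pvAW2I uniqueWords
  -- [[0 for j in range(num_words)] for i in range(num_texts)]
  let mat0 := (List.range texts.length).map (fun _ =>
    (List.range uniqueWords.length).map (fun _ => (0 : Int)))
  (pvAMatrix texts wordToIndex mat0, uniqueWords)

-- ===== PORT B =====
-- seen = set(); vocab = []; for text: for w in text.split(): if w not in seen: …
def pvBScan (texts : List String) : PySem.Set String × List String :=
  texts.foldl (fun sv text =>
    (PySem.Str.split₀ text).foldl (fun sv w =>
      if PySem.Set.contains sv.1 w then sv else (PySem.Set.add sv.1 w, sv.2 ++ [w])) sv)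
    (PySem.Set.empty, ([] : List String))

-- [c[w] for w in vocab]   (Counter lookup: missing key counts 0)
def pvBRow (c : PySem.Dict String Int) (vocab : List String) : List Int :=
  vocab.map (fun w => c.getD w 0)

def bag_of_words_alt (texts : List String) : List (List Int) × List String :=
  let counters := texts.map (fun text => PySem.Dict.counter (PySem.Str.split₀ text))
  let vocab := (pvBScan texts).2
  (counters.map (fun c => pvBRow c vocab), vocab)

-- ===== PRECONDITION & SPEC =====
def Spec_bag_of_words (texts : List String) (out : List (List Int) × List String) : Prop := out = bag_of_words_alt texts
instance (texts : List String) (out : List (List Int) × List String) : Decidable (Spec_bag_of_words texts out) := by unfold Spec_bag_of_words; infer_instance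

-- ===== CLAIM (what is proved, stated in full; the proofs are below) =====
def Claim_equal_bag_of_words : Prop := ∀ (texts : List String), Dom_bag_of_words texts → Spec_bag_of_words texts (bag_of_words texts)

-- ===== LEMMAS AND PROOFS =====

-- A's nested update loop is Counter(all words, texts in order)
lemma pvAFreqs_eq_counter (texts : List String) :
    pvAFreqs texts = PySem.Dict.counter (texts.flatMap (fun t => PySem.Str.split₀ t)) := by
  rw [PySem.Dict.counter_eq_foldl, List.foldl_flatMap]; rfl

-- B's seen/vocab loop keeps seen = vocab and both are the ordered-dedup of the words seen so far
lemma pvBScan_diag (ws : List String) (s : List String) :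
    ws.foldl (fun (sv : PySem.Set String × List String) w =>
        if PySem.Set.contains sv.1 w then sv else (PySem.Set.add sv.1 w, sv.2 ++ [w])) (s, s)
    = (ws.foldl PySem.Set.add s, ws.foldl PySem.Set.add s) := by
  induction ws generalizing s with
  | nil => rfl
  | cons w t ih =>
    simp only [List.foldl_cons]
    by_cases h : PySem.Set.contains s w
    · have hs : PySem.Set.add s w = s := by
        simp [PySem.Set.add, PySem.Set.contains] at h ⊢; simp [h]
      simp only [h, if_true]
      rw [hs]; exact ih s
    · have hs : PySem.Set.add s w = s ++ [w] := by
        simp [PySem.Set.add, PySem.Set.contains] at h ⊢; simp [h]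
      rw [if_neg (by simpa using h), hs]; exact ih (s ++ [w])

lemma pvBScan_eq (texts : List String) :
    (pvBScan texts).2 = PySem.Set.ofList (texts.flatMap (fun t => PySem.Str.split₀ t)) := by
  unfold pvBScan
  rw [← List.foldl_flatMap]
  have := pvBScan_diag (texts.flatMap (fun t => PySem.Str.split₀ t)) []
  rw [show (PySem.Set.empty, ([] : List String)) = (([] : List String), ([] : List String)) from
      rfl, this, PySem.Set.ofList_eq_foldl]

-- word_to_index lookups
lemma pvW2I_get?_notmem (ws : List String) (s : Int) (d : PySem.Dict String Int) (w : String)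
    (hw : w ∉ ws) :
    ((PySem.List.enumerate ws s).foldl (fun d p => d.insert p.2 p.1) d).get? w = d.get? w := by
  induction ws generalizing s d with
  | nil => rfl
  | cons x t ih =>
    rw [PySem.List.enumerate_cons, List.foldl_cons,
      ih _ _ (fun h => hw (List.mem_cons_of_mem _ h))]
    exact PySem.Dict.get?_insert_of_ne _ _ (fun h => hw (h ▸ List.mem_cons_self))

lemma pvW2I_get?_mem (ws : List String) (hnd : ws.Nodup) (s : Int) (d : PySem.Dict String Int)
    (w : String) (hw : w ∈ ws) :
    ((PySem.List.enumerate ws s).foldl (fun d p => d.insert p.2 p.1) d).get? w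
      = some (s + (ws.idxOf w : Int)) := by
  induction ws generalizing s d with
  | nil => cases hw
  | cons x t ih =>
    rw [PySem.List.enumerate_cons, List.foldl_cons]
    rcases List.nodup_cons.mp hnd with ⟨hx, hndt⟩
    by_cases hwx : w = x
    · subst hwx
      rw [pvW2I_get?_notmem _ _ _ _ hx, PySem.Dict.get?_insert_self, List.idxOf_cons_self]
      simp
    · have hwt : w ∈ t := (List.mem_cons.mp hw).resolve_left hwx
      rw [ih hndt (s + 1) _ hwt, List.idxOf_cons_ne _ (Ne.symm hwx)]
      push_cast; ring_nf

-- the per-text word loop only edits row i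
lemma pvA_inner_pull (w2i : PySem.Dict String Int) (i : Nat) (ws : List String)
    (m : List (List Int)) :
    ws.foldl (fun m w => pvAStepWord w2i i m w) m
    = m.modify i (fun row => ws.foldl (fun row w =>
        match w2i.get? w with
        | some j => row.modify j.toNat (· + 1)
        | none => row) row) := by
  induction ws generalizing m with
  | nil => exact (List.modify_id i m).symm
  | cons w t ih =>
    simp only [List.foldl_cons]
    cases h : w2i.get? w with
    | none => rw [show pvAStepWord w2i i m w = m by simp [pvAStepWord, h], ih]
    | some j =>
      rw [show pvAStepWord w2i i m w = m.modify i (fun row => row.modify j.toNat (· + 1)) by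
            simp [pvAStepWord, h],
        ih, List.modify_modify_eq]
      congr 1

-- the outer enumerate loop, row by row
lemma pvA_enum_modify (G : String → List Int → List Int) :
    ∀ (ts : List String) (s : Nat) (mat : List (List Int)) (j : Nat),
    ((PySem.List.enumerate ts (s : Int)).foldl (fun m p => m.modify p.1.toNat (G p.2)) mat)[j]?
    = if s ≤ j then
        (match ts[j - s]? with
         | some t => mat[j]?.map (G t)
         | none => mat[j]?)
      else mat[j]? := by
  intro ts
  induction ts with
  | nil => intro s mat j; simp [PySem.List.enumerate]
  | cons t ts ih =>
    intro s mat j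
    rw [PySem.List.enumerate_cons, List.foldl_cons]
    have hcast : ((s : Int) + 1) = ((s + 1 : Nat) : Int) := by push_cast; ring
    rw [hcast, ih (s + 1) (mat.modify (s : Int).toNat (G t)) j]
    have hm : (mat.modify (s : Int).toNat (G t))[j]?
        = if s = j then mat[j]?.map (G t) else mat[j]? := by
      rw [show ((s : Int).toNat) = s by simp, List.getElem?_modify]
      by_cases hsj : s = j
      · subst hsj; simp
      · simp only [hsj, if_false]
        cases mat[j]? <;> simp
    rcases Nat.lt_trichotomy j s with hlt | heq | hgt
    · rw [if_neg (by omega), if_neg (by omega), hm, if_neg (by omega)]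
    · subst heq
      rw [if_neg (by omega), if_pos (le_refl _), Nat.sub_self]
      simp only [List.getElem?_cons_zero]
      rw [hm, if_pos rfl]
    · rw [if_pos (by omega), if_pos (by omega)]
      have h1 : j - s = (j - (s + 1)) + 1 := by omega
      rw [h1, List.getElem?_cons_succ, hm, if_neg (by omega)]

-- modifying the cell of w in a vocab-shaped row bumps exactly w's entry
lemma pvRow_modify_idxOf (vocab : List String) (hnd : vocab.Nodup) (f : String → Int)
    (w : String) (hw : w ∈ vocab) :
    (vocab.map f).modify (vocab.idxOf w) (· + 1)
    = vocab.map (fun v => if v = w then f v + 1 else f v) := by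
  induction vocab with
  | nil => cases hw
  | cons x vs ih =>
    rcases List.nodup_cons.mp hnd with ⟨hx, hnvs⟩
    by_cases hxw : x = w
    · subst hxw
      rw [List.idxOf_cons_self, List.map_cons, List.modify_zero_cons, List.map_cons, if_pos rfl]
      congr 1
      refine (List.map_congr_left ?_).symm
      intro v hv
      rw [if_neg (by rintro rfl; exact hx hv)]
    · have hwvs : w ∈ vs := (List.mem_cons.mp hw).resolve_left (fun h => hxw h.symm)
      rw [List.idxOf_cons_ne _ hxw, List.map_cons, List.modify_succ_cons, List.map_cons,
        if_neg hxw, ih hnvs hwvs]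

-- the word loop on one row counts each vocabulary word's occurrences
lemma pvRow_fold (vocab : List String) (hnd : vocab.Nodup) :
    ∀ (ws : List String) (f : String → Int), (∀ w ∈ ws, w ∈ vocab) →
    ws.foldl (fun row w =>
        match (pvAW2I vocab).get? w with
        | some j => row.modify j.toNat (· + 1)
        | none => row) (vocab.map f)
    = vocab.map (fun v => f v + (ws.count v : Int)) := by
  intro ws
  induction ws with
  | nil => intro f _; simp
  | cons w t ih =>
    intro f hmem
    have hwv : w ∈ vocab := hmem w List.mem_cons_self
    have hget : (pvAW2I vocab).get? w = some (0 + (vocab.idxOf w : Int)) :=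
      pvW2I_get?_mem vocab hnd 0 _ w hwv
    rw [List.foldl_cons]
    have hstep : (match (pvAW2I vocab).get? w with
        | some j => (vocab.map f).modify j.toNat (· + 1)
        | none => vocab.map f)
        = vocab.map (fun v => if v = w then f v + 1 else f v) := by
      rw [hget]
      have h0 : ((0 : Int) + (vocab.idxOf w : Int)).toNat = vocab.idxOf w := by simp
      simp only [h0]
      exact pvRow_modify_idxOf vocab hnd f w hwv
    rw [hstep, ih _ (fun u hu => hmem u (List.mem_cons_of_mem _ hu))]
    refine List.map_congr_left ?_
    intro v hv
    by_cases hvw : v = w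
    · subst hvw
      rw [if_pos rfl, List.count_cons_self]
      push_cast; ring
    · rw [if_neg hvw, List.count_cons_of_ne (fun h => hvw h.symm)]

-- ===== VERDICT (by name: the statement is the Claim_ definition above) =====
theorem bag_of_words_spec : Claim_equal_bag_of_words := by
  intro texts _
  unfold Spec_bag_of_words
  dsimp only [bag_of_words, bag_of_words_alt]
  have hA : (pvAFreqs texts).keys
      = PySem.Set.ofList (texts.flatMap (fun t => PySem.Str.split₀ t)) := by
    rw [pvAFreqs_eq_counter, PySem.Dict.keys_counter]
  rw [hA, pvBScan_eq]
  set V : List String := PySem.Set.ofList (texts.flatMap (fun t => PySem.Str.split₀ t)) with hV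
  have hnd : V.Nodup := PySem.Set.nodup_ofList _
  simp only [Prod.mk.injEq]
  refine ⟨?_, trivial⟩
  -- the matrices
  set G : String → List Int → List Int := fun t row =>
    (PySem.Str.split₀ t).foldl (fun row w =>
      match (pvAW2I V).get? w with
      | some j => row.modify j.toNat (· + 1)
      | none => row) row with hG
  have hpull : pvAMatrix texts (pvAW2I V)
        ((List.range texts.length).map (fun _ => (List.range V.length).map (fun _ => (0 : Int))))
      = (PySem.List.enumerate texts).foldl (fun m p => m.modify p.1.toNat (G p.2))
        ((List.range texts.length).map (fun _ => (List.range V.length).map (fun _ => (0 : Int)))) := by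
    unfold pvAMatrix
    congr 1
    funext m p
    exact pvA_inner_pull (pvAW2I V) p.1.toNat (PySem.Str.split₀ p.2) m
  rw [hpull]
  set r0 : List Int := (List.range V.length).map (fun _ => (0 : Int)) with hr0
  have hr0V : r0 = V.map (fun _ => (0 : Int)) := by
    rw [hr0, List.map_const', List.map_const', List.length_range]
  apply List.ext_getElem?
  intro j
  have henum : PySem.List.enumerate texts = PySem.List.enumerate texts ((0 : Nat) : Int) := by
    norm_num
  rw [henum, pvA_enum_modify G texts 0
    ((List.range texts.length).map (fun _ => r0)) j, if_pos (Nat.zero_le j), Nat.sub_zero]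
  cases ht : texts[j]? with
  | none =>
    have hj : texts.length ≤ j := List.getElem?_eq_none_iff.mp ht
    have h1 : (List.range texts.length)[j]? = none :=
      List.getElem?_eq_none_iff.mpr (by simpa using hj)
    simp only [List.getElem?_map, ht, h1, Option.map_none]
  | some t =>
    have hj : j < texts.length := by
      by_contra h
      rw [List.getElem?_eq_none_iff.mpr (by omega)] at ht; cases ht
    simp only [List.getElem?_map, ht, Option.map_some, List.getElem?_range hj]
    have htmem : t ∈ texts := List.mem_of_getElem? ht
    have hmem : ∀ w ∈ PySem.Str.split₀ t, w ∈ V := by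
      intro w hw
      rw [hV, PySem.Set.mem_ofList]
      exact List.mem_flatMap.mpr ⟨t, htmem, hw⟩
    have hrow : G t r0 = V.map (fun v => ((PySem.Str.split₀ t).count v : Int)) := by
      rw [hG, hr0V]
      dsimp only
      rw [pvRow_fold V hnd (PySem.Str.split₀ t) (fun _ => (0 : Int)) hmem]
      exact List.map_congr_left (fun v _ => by ring)
    have hcnt : pvBRow (PySem.Dict.counter (PySem.Str.split₀ t)) V
        = V.map (fun v => ((PySem.Str.split₀ t).count v : Int)) :=
      List.map_congr_left (fun v _ => PySem.Dict.getD_counter _ v)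
    rw [hrow, hcnt]
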